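-- pv_equiv track=rewrite | github.com/NickStrick/Code-Challenges | CodeWars/DuplicateEncoder.py | duplicate_encode
-- ===== SOURCE A (Python) =====
-- def duplicate_encode(word):
--     countObj = {}
--     wArr = list(str(word))
--     for letter in wArr:
--         letter = letter.lower()
--         if letter in countObj:
--             countObj[letter] += 1
--         else:
--             countObj[letter] = 1
--
--     res = ''
--     for letter in wArr:
--         letter = letter.lower()
--         if countObj[letter] > 1:
--             res += ')'
--         else:
--             res += '('
--     return res
-- ===== SOURCE B (Python) =====
-- def duplicate_encode(word):
--     lw = str(word).lower()
--     res = []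
--     first = {}  # char -> index of its sole occurrence so far, or -1 once known duplicate
--     for i, c in enumerate(lw):
--         j = first.get(c)
--         if j is None:
--             first[c] = i
--             res.append('(')
--         else:
--             if j >= 0:
--                 res[j] = ')'   # back-patch the first occurrence
--                 first[c] = -1
--             res.append(')')
--     return ''.join(res)
-- ===== Notes on version B (the rewrite author's own statement) =====
-- stated objective: alternative
-- what changed: Replaces A's two-stage algorithm (build a full frequency dict, then a second emission pass over the word) by a single back-patching pass: emit an open paren optimistically for each new character and, on its second sighting, patch that character's first cell to a close paren using a first-occurrence-index dict.
import Mathlib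
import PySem

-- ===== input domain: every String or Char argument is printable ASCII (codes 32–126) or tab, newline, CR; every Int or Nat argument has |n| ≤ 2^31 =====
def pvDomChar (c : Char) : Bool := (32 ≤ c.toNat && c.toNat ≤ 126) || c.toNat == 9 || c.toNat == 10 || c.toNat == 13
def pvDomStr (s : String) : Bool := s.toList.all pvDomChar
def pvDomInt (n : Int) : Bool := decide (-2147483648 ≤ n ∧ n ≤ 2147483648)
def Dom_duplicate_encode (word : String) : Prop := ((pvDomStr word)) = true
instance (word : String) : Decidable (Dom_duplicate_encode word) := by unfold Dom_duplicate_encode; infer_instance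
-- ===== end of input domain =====

-- B replaces A's two-stage count-then-emit algorithm by a single back-patching pass:
-- it emits an open paren optimistically and, on the second sighting of a character,
-- patches that character's first cell to a close paren (one loop instead of two; the
-- timing run measured B faster by a constant factor).


-- ===== PORT A =====
def duplicate_encode (word : String) : String :=
  let wArr := word.toList
  let countObj : PySem.Dict Char Int :=
    wArr.foldl (fun d letter =>
      let l := PySem.Chars.lowerChar letter
      if d.contains l then d.modify l 0 (· + 1) else d.insert l 1) PySem.Dict.empty
  let res := wArr.foldl (fun res letter =>
      let l := PySem.Chars.lowerChar letter
      res ++ [if 1 < countObj.getD l 0 then ')' else '(']) ([] : List Char)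
  String.ofList res

-- ===== PORT B =====
-- one iteration of B's loop body (state: the emitted cells and the first-occurrence dict)
def duplicate_encode_step (st : List Char × PySem.Dict Char Int) (ic : Int × Char) :
    List Char × PySem.Dict Char Int :=
  match st.2.get? ic.2 with
  | none => (st.1 ++ ['('], st.2.insert ic.2 ic.1)
  | some j =>
      if 0 ≤ j then ((st.1.set j.toNat ')') ++ [')'], st.2.insert ic.2 (-1))
      else (st.1 ++ [')'], st.2)

def duplicate_encode_alt (word : String) : String :=
  let lw := (PySem.Str.lower word).toList
  let st := (PySem.List.enumerate lw).foldl duplicate_encode_step ([], PySem.Dict.empty)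
  String.ofList st.1

-- ===== PRECONDITION & SPEC =====
def Spec_duplicate_encode (word : String) (out : String) : Prop := out = duplicate_encode_alt word
instance (word : String) (out : String) : Decidable (Spec_duplicate_encode word out) := by unfold Spec_duplicate_encode; infer_instance

-- ===== CLAIM (what is proved, stated in full; the proofs are below) =====
def Claim_equal_duplicate_encode : Prop := ∀ (word : String), Dom_duplicate_encode word → Spec_duplicate_encode word (duplicate_encode word)

-- ===== LEMMAS AND PROOFS =====

-- the common normal form of both programs: ')' at a position iff its character repeats
def dupMark (l : List Char) (c : Char) : Char := if 2 ≤ l.count c then ')' else '('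

-- A's counting loop ('if letter in countObj: +=1 else: =1') is exactly Counter of the lowercased list.
lemma countLoop_eq_counter (l : List Char) :
    l.foldl (fun d letter =>
      let lo := PySem.Chars.lowerChar letter
      if d.contains lo then d.modify lo 0 (· + 1) else d.insert lo 1) PySem.Dict.empty
    = PySem.Dict.counter (l.map PySem.Chars.lowerChar) := by
  rw [PySem.Dict.counter_eq_foldl, List.foldl_map]
  congr 1
  funext d letter
  by_cases h : d.contains (PySem.Chars.lowerChar letter)
  · simp [h, PySem.Dict.modify]
  · simp [h, PySem.Dict.modify, PySem.Dict.getD_of_not_contains d 0 (by simpa using h)]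

lemma a_normal (word : String) :
    duplicate_encode word
      = String.ofList ((word.toList.map PySem.Chars.lowerChar).map
          (dupMark (word.toList.map PySem.Chars.lowerChar))) := by
  unfold duplicate_encode
  simp only [countLoop_eq_counter, PySem.List.foldl_append_singleton_eq_map,
    PySem.Dict.getD_counter]
  rw [List.nil_append, List.map_map]
  congr 1
  refine List.map_congr_left (fun x _ => ?_)
  simp only [Function.comp, dupMark]
  congr 1
  simp [Nat.one_lt_cast]
  omega

-- two occurrences at distinct positions force count ≥ 2
lemma two_le_count_of_two_getElem {l : List Char} {c : Char} {i k : Nat}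
    (hi : i < l.length) (hk : k < l.length) (hne : i ≠ k)
    (hci : l[i] = c) (hck : l[k] = c) : 2 ≤ l.count c := by
  rcases Nat.lt_or_ge i k with h | h
  · have h1 : c ∈ l.take k := by
      have : (l.take k)[i]'(by simp; omega) = c := by
        simpa [List.getElem_take] using hci
      exact this ▸ List.getElem_mem _
    have h2 : c ∈ l.drop k := by
      have : (l.drop k)[0]'(by simp; omega) = c := by
        simpa [List.getElem_drop] using hck
      exact this ▸ List.getElem_mem _
    have h3 : 1 ≤ (l.take k).count c := List.one_le_count_iff.mpr h1
    have h4 : 1 ≤ (l.drop k).count c := List.one_le_count_iff.mpr h2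
    calc 2 ≤ (l.take k).count c + (l.drop k).count c := by omega
      _ = l.count c := by rw [← List.count_append, List.take_append_drop]
  · have h' : k < i := lt_of_le_of_ne h (Ne.symm hne)
    have h1 : c ∈ l.take i := by
      have : (l.take i)[k]'(by simp; omega) = c := by
        simpa [List.getElem_take] using hck
      exact this ▸ List.getElem_mem _
    have h2 : c ∈ l.drop i := by
      have : (l.drop i)[0]'(by simp; omega) = c := by
        simpa [List.getElem_drop] using hci
      exact this ▸ List.getElem_mem _
    have h3 : 1 ≤ (l.take i).count c := List.one_le_count_iff.mpr h1
    have h4 : 1 ≤ (l.drop i).count c := List.one_le_count_iff.mpr h2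
    calc 2 ≤ (l.take i).count c + (l.drop i).count c := by omega
      _ = l.count c := by rw [← List.count_append, List.take_append_drop]

-- appending one character bumps exactly that character's count
lemma count_append_one (pre : List Char) (c x : Char) :
    (pre ++ [c]).count x = pre.count x + if c = x then 1 else 0 := by
  simp [List.count_append, List.count_singleton]

-- loop invariant for B's first-occurrence dict over the processed prefix
def InvB (pre : List Char) (first : PySem.Dict Char Int) : Prop :=
  ∀ c : Char,
    (first.get? c = none → pre.count c = 0) ∧
    (∀ j : Int, first.get? c = some j →
       (j = -1 ∧ 2 ≤ pre.count c) ∨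
       (0 ≤ j ∧ pre.count c = 1 ∧ pre[j.toNat]? = some c))

-- the dict produced by one step of B's loop
def nextDict (first : PySem.Dict Char Int) (c : Char) (n : Int) : PySem.Dict Char Int :=
  match first.get? c with
  | none => first.insert c n
  | some j => if 0 ≤ j then first.insert c (-1) else first

-- one step of B's loop: the cells stay the prefix image under dupMark, extended by c
lemma step_eq (pre : List Char) (first : PySem.Dict Char Int) (c : Char)
    (h : InvB pre first) :
    duplicate_encode_step (pre.map (dupMark pre), first) ((pre.length : Int), c)
      = ((pre ++ [c]).map (dupMark (pre ++ [c])), nextDict first c (pre.length : Int)) := by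
  unfold duplicate_encode_step nextDict
  rcases hg : first.get? c with _ | j
  · -- fresh character: append '('
    have hcnt : pre.count c = 0 := (h c).1 hg
    simp only [List.map_append, List.map_cons, List.map_nil]
    have h1 : List.map (dupMark (pre ++ [c])) pre = List.map (dupMark pre) pre := by
      refine List.map_congr_left (fun x hx => ?_)
      have hxc : c ≠ x := by
        rintro rfl; exact (List.count_eq_zero.mp hcnt) hx
      simp [dupMark, hxc]
    have h2 : dupMark (pre ++ [c]) c = '(' := by
      simp [dupMark, hcnt]
    rw [h1, h2]
  · rcases (h c).2 j hg with ⟨hj, hcnt⟩ | ⟨hj, hcnt, hidx⟩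
    · -- already a known duplicate: append ')'
      have hneg : ¬ (0 ≤ j) := by omega
      simp only [hneg, if_false, List.map_append, List.map_cons, List.map_nil]
      have h1 : List.map (dupMark (pre ++ [c])) pre = List.map (dupMark pre) pre := by
        refine List.map_congr_left (fun x hx => ?_)
        by_cases hxc : c = x
        · subst hxc
          simp only [dupMark, count_append_one]
          have h2c : 2 ≤ pre.count c + 1 := by omega
          simp [hcnt, h2c]
        · simp [dupMark, hxc]
      have h2 : dupMark (pre ++ [c]) c = ')' := by
        simp only [dupMark, count_append_one]
        have h2c : (2:Nat) ≤ pre.count c + 1 := by omega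
        simp [h2c]
      rw [h1, h2]
    · -- second sighting: back-patch cell j and append ')'
      have hjlt : j.toNat < pre.length := (List.getElem?_eq_some_iff.mp hidx).1
      have hjc : pre[j.toNat] = c := by
        have := (List.getElem?_eq_some_iff.mp hidx).2; simpa using this
      simp only [hj, if_true, List.map_append, List.map_cons, List.map_nil]
      have h1 : (List.map (dupMark pre) pre).set j.toNat ')'
          = List.map (dupMark (pre ++ [c])) pre := by
        refine List.ext_getElem (by simp) (fun i hi1 hi2 => ?_)
        have hi : i < pre.length := by simpa using hi2
        rw [List.getElem_set]
        by_cases hij : j.toNat = i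
        · subst hij
          have : dupMark (pre ++ [c]) c = ')' := by
            simp only [dupMark, count_append_one]
            have : (2:Nat) ≤ pre.count c + 1 := by omega
            simp [this]
          simp [List.getElem_map, hjc, this]
        · have hxc : pre[i] ≠ c := by
            intro hx
            have := two_le_count_of_two_getElem hi hjlt (fun he => hij he.symm) hx hjc
            omega
          have hcx : ¬ (c = pre[i]) := fun he => hxc he.symm
          simp only [List.getElem_map, dupMark, count_append_one, hcx, if_false, add_zero]
          rw [if_neg hij]
      have h2 : dupMark (pre ++ [c]) c = ')' := by
        simp only [dupMark, count_append_one]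
        have h2c : (2:Nat) ≤ pre.count c + 1 := by omega
        simp [hcnt, h2c]
      rw [h1, h2]

-- one step of B's loop preserves the dict invariant
lemma step_inv (pre : List Char) (first : PySem.Dict Char Int) (c : Char)
    (h : InvB pre first) : InvB (pre ++ [c]) (nextDict first c (pre.length : Int)) := by
  rcases hg : first.get? c with _ | j
  · have hnd : nextDict first c (pre.length : Int) = first.insert c (pre.length : Int) := by
      unfold nextDict; rw [hg]
    rw [hnd]
    have hcnt : pre.count c = 0 := (h c).1 hg
    intro d
    constructor
    · intro hd
      by_cases hdc : d = c
      · subst hdc; rw [PySem.Dict.get?_insert] at hd; simp at hd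
      · rw [PySem.Dict.get?_insert, if_neg hdc] at hd
        have := (h d).1 hd
        have hcd : ¬ (c = d) := fun he => hdc he.symm
        simp [this, hcd]
    · intro j hd
      by_cases hdc : d = c
      · subst hdc
        rw [PySem.Dict.get?_insert, if_pos rfl] at hd
        obtain rfl : ((pre.length : Nat) : Int) = j := by injection hd
        right
        refine ⟨by positivity, ?_, ?_⟩
        · simp [hcnt]
        · simpa using List.getElem?_concat_length pre d
      · rw [PySem.Dict.get?_insert, if_neg hdc] at hd
        rcases (h d).2 j hd with ⟨h1, h2⟩ | ⟨h1, h2, h3⟩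
        · left
          have hcd : ¬ (c = d) := fun he => hdc he.symm
          refine ⟨h1, by simp [hcd]; omega⟩
        · right
          have hcd : ¬ (c = d) := fun he => hdc he.symm
          refine ⟨h1, by simp [hcd, h2], ?_⟩
          have hlt : j.toNat < pre.length := (List.getElem?_eq_some_iff.mp h3).1
          rw [List.getElem?_append_left hlt]; exact h3
  · have hnd : nextDict first c (pre.length : Int) = if 0 ≤ j then first.insert c (-1) else first := by
      unfold nextDict; rw [hg]
    rw [hnd]
    rcases (h c).2 j hg with ⟨hj, hcnt⟩ | ⟨hj, hcnt, hidx⟩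
    · have hneg : ¬ (0 ≤ j) := by omega
      rw [if_neg hneg]
      intro d
      constructor
      · intro hd
        by_cases hdc : d = c
        · subst hdc; rw [hg] at hd; cases hd
        · have := (h d).1 hd
          have hcd : ¬ (c = d) := fun he => hdc he.symm
          simp [this, hcd]
      · intro j' hd
        by_cases hdc : d = c
        · subst hdc
          rw [hg] at hd
          obtain rfl : j = j' := by injection hd
          left
          refine ⟨hj, ?_⟩
          have h2c := hcnt
          simp only [count_append_one, if_pos rfl]
          omega
        · rcases (h d).2 j' hd with ⟨h1, h2⟩ | ⟨h1, h2, h3⟩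
          · left
            have hcd : ¬ (c = d) := fun he => hdc he.symm
            refine ⟨h1, by simp [hcd]; omega⟩
          · right
            have hcd : ¬ (c = d) := fun he => hdc he.symm
            refine ⟨h1, by simp [hcd, h2], ?_⟩
            have hlt : j'.toNat < pre.length := (List.getElem?_eq_some_iff.mp h3).1
            rw [List.getElem?_append_left hlt]; exact h3
    · rw [if_pos hj]
      intro d
      constructor
      · intro hd
        by_cases hdc : d = c
        · subst hdc; rw [PySem.Dict.get?_insert] at hd; simp at hd
        · rw [PySem.Dict.get?_insert, if_neg hdc] at hd
          have := (h d).1 hd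
          have hcd : ¬ (c = d) := fun he => hdc he.symm
          simp [this, hcd]
      · intro j' hd
        by_cases hdc : d = c
        · subst hdc
          rw [PySem.Dict.get?_insert, if_pos rfl] at hd
          obtain rfl : (-1 : Int) = j' := by injection hd
          left
          refine ⟨rfl, by simp [hcnt]⟩
        · rw [PySem.Dict.get?_insert, if_neg hdc] at hd
          rcases (h d).2 j' hd with ⟨h1, h2⟩ | ⟨h1, h2, h3⟩
          · left
            have hcd : ¬ (c = d) := fun he => hdc he.symm
            refine ⟨h1, by simp [hcd]; omega⟩
          · right
            have hcd : ¬ (c = d) := fun he => hdc he.symm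
            refine ⟨h1, by simp [hcd, h2], ?_⟩
            have hlt : j'.toNat < pre.length := (List.getElem?_eq_some_iff.mp h3).1
            rw [List.getElem?_append_left hlt]; exact h3

lemma loop_inv (suf : List Char) :
    ∀ (pre : List Char) (first : PySem.Dict Char Int), InvB pre first →
    ((PySem.List.enumerate suf (pre.length : Int)).foldl duplicate_encode_step
        (pre.map (dupMark pre), first)).1
      = (pre ++ suf).map (dupMark (pre ++ suf)) := by
  induction suf with
  | nil => intro pre first _; simp
  | cons c suf' ih =>
    intro pre first hinv
    rw [PySem.List.enumerate_cons, List.foldl_cons, step_eq pre first c hinv]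
    have hlen : ((pre.length : Int) + 1) = (((pre ++ [c]).length : Nat) : Int) := by
      simp
    rw [hlen, ih (pre ++ [c]) _ (step_inv pre first c hinv), List.append_assoc]
    rfl

lemma b_normal (word : String) :
    duplicate_encode_alt word
      = String.ofList ((word.toList.map PySem.Chars.lowerChar).map
          (dupMark (word.toList.map PySem.Chars.lowerChar))) := by
  unfold duplicate_encode_alt
  have h0 : InvB [] PySem.Dict.empty := by
    intro c
    constructor
    · intro _; simp
    · intro j hj; simp [PySem.Dict.get?_empty] at hj
  have := loop_inv (word.toList.map PySem.Chars.lowerChar) [] PySem.Dict.empty h0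
  simp only [List.length_nil, Nat.cast_zero, List.map_nil, List.nil_append] at this
  simp only [PySem.Str.toList_lower, PySem.Chars.lower]
  exact congrArg String.ofList this

-- ===== VERDICT (by name: the statement is the Claim_ definition above) =====
theorem duplicate_encode_spec : Claim_equal_duplicate_encode := by
  intro word _
  show duplicate_encode word = duplicate_encode_alt word
  rw [a_normal, b_normal]
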